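-- pv_equiv track=rewrite | github.com/sion0104/algorithm-data-structure | Python3/프로그래머스/0/181890. 왼쪽 오른쪽/왼쪽 오른쪽.py | solution
-- ===== SOURCE A (Python) =====
-- def solution(str_list):
--     answer = []
--
--     for index in range(len(str_list)):
--         if str_list[index] == "l":
--             answer = str_list[0:index]
--             break
--         elif str_list[index] == "r":
--             answer = str_list[index+1:]
--             break
--
--     return answer
-- ===== SOURCE B (Python) =====
-- def solution(str_list):
--     l_idx = str_list.index("l") if "l" in str_list else len(str_list)
--     r_idx = str_list.index("r") if "r" in str_list else len(str_list)
--     if l_idx == r_idx: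
--         return []
--     if l_idx < r_idx:
--         return str_list[:l_idx]
--     return str_list[r_idx + 1:]
-- ===== Notes on version B (the rewrite author's own statement) =====
-- stated objective: simpler
-- what changed: Replaces A's single fused early-breaking index loop with two independent first-occurrence lookups (.index with a length sentinel when absent) followed by one comparison to pick the slice.
import Mathlib
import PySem

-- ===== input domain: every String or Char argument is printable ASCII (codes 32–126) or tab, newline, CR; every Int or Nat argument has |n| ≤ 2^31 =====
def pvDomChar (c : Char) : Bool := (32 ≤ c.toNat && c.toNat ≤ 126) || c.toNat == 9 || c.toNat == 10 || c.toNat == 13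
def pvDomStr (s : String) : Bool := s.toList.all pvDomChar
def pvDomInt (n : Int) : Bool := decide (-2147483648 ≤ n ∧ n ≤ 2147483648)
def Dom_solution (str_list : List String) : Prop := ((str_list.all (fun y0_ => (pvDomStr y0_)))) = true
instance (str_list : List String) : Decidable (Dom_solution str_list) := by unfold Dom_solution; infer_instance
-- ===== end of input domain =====

-- B replaces A's fused early-breaking scan by two independent .index lookups and a comparison (objective: simpler).

-- ===== PORT A =====
-- the for-loop over range(len(str_list)) with break, as structural recursion over the index list
def solutionGo (str_list : List String) : List Nat → List String
  | [] => []
  | i :: rest =>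
    if PySem.List.pyGetD str_list (i : Int) "" = "l" then
      PySem.List.slice str_list (some 0) (some (i : Int))
    else if PySem.List.pyGetD str_list (i : Int) "" = "r" then
      PySem.List.slice str_list (some ((i : Int) + 1)) none
    else solutionGo str_list rest

def solution (str_list : List String) : List String :=
  solutionGo str_list (List.range str_list.length)

-- ===== PORT B =====
def solution_alt (str_list : List String) : List String :=
  let l_idx : Int := match PySem.List.index? str_list "l" with
    | some k => (k : Int)
    | none => (str_list.length : Int)
  let r_idx : Int := match PySem.List.index? str_list "r" with
    | some k => (k : Int)
    | none => (str_list.length : Int)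
  if l_idx = r_idx then []
  else if l_idx < r_idx then PySem.List.slice str_list none (some l_idx)
  else PySem.List.slice str_list (some (r_idx + 1)) none

-- ===== PRECONDITION & SPEC =====
def Spec_solution (str_list : List String) (out : List String) : Prop := out = solution_alt str_list
instance (str_list : List String) (out : List String) : Decidable (Spec_solution str_list out) := by unfold Spec_solution; infer_instance

-- ===== CLAIM (what is proved, stated in full; the proofs are below) =====
def Claim_equal_solution : Prop := ∀ (str_list : List String), Dom_solution str_list → Spec_solution str_list (solution str_list)

-- ===== LEMMAS AND PROOFS =====

-- common characterisation: the first 'l'/'r' decides everything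
def pvSpec (xs : List String) : List String :=
  match List.findIdx? (fun s => s == "l" || s == "r") xs with
  | none => []
  | some k => if xs.getD k "" = "l" then xs.take k else xs.drop (k + 1)

lemma A_go (suf : List String) : ∀ (pre : List String),
    solutionGo (pre ++ suf) (List.range' pre.length suf.length) =
      match List.findIdx? (fun s => s == "l" || s == "r") suf with
      | none => []
      | some k => if suf.getD k "" = "l" then (pre ++ suf).take (pre.length + k)
                  else (pre ++ suf).drop (pre.length + k + 1) := by
  induction suf with
  | nil => intro pre; simp [solutionGo]
  | cons y t ih =>
    intro pre
    have hget : PySem.List.pyGetD (pre ++ y :: t) (pre.length : Int) "" = y := by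
      simp [PySem.List.pyGetD_natCast, List.getD]
    rw [List.length_cons, List.range'_succ]
    by_cases hl : y = "l"
    · subst hl
      simp [solutionGo, hget, List.findIdx?_cons]
    · by_cases hr : y = "r"
      · subst hr
        have hc : ((pre.length : Int) + 1) = ((pre.length + 1 : Nat) : Int) := by push_cast; ring
        simp only [solutionGo]
        rw [hget, if_neg hl, if_pos rfl, hc, PySem.List.slice_from_natCast]
        simp [List.findIdx?_cons, hl]
      · have hstep : pre ++ y :: t = (pre ++ [y]) ++ t := by simp
        have hlen : pre.length + 1 = (pre ++ [y]).length := by simp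
        simp only [solutionGo, hget, hl, hr, if_false]
        rw [hlen, hstep, ih (pre ++ [y])]
        have hp : (y == "l" || y == "r") = false := by simp [hl, hr]
        simp only [List.findIdx?_cons, hp, Bool.false_eq_true, if_false]
        cases hfi : List.findIdx? (fun s => s == "l" || s == "r") t with
        | none => simp
        | some k =>
          simp only [Option.map_some]
          have hgd : (y :: t).getD (k + 1) "" = t.getD k "" := by simp [List.getD]
          rw [hgd]
          have h1 : (pre ++ [y]).length + k = pre.length + (k + 1) := by simp; omega
          rw [h1]

lemma A_eq_pvSpec (xs : List String) : solution xs = pvSpec xs := by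
  have h := A_go xs []
  simp only [List.nil_append, List.length_nil, Nat.zero_add] at h
  rw [solution, List.range_eq_range', h, pvSpec]

lemma B_eq_pvSpec (xs : List String) : solution_alt xs = pvSpec xs := by
  unfold solution_alt pvSpec
  simp only [PySem.List.index?_eq_idxOf?]
  cases hf : List.findIdx? (fun s => s == "l" || s == "r") xs with
  | none =>
    have hall := List.findIdx?_eq_none_iff.mp hf
    have hl : PySem.List.index? xs "l" = none := by
      rw [PySem.List.index?_eq_none_iff]
      intro hmem; simpa using hall _ hmem
    have hr : PySem.List.index? xs "r" = none := by
      rw [PySem.List.index?_eq_none_iff]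
      intro hmem; simpa using hall _ hmem
    rw [PySem.List.index?_eq_idxOf?] at hl hr
    simp [hl, hr]
  | some k =>
    obtain ⟨hk, hpk, hmin⟩ := List.findIdx?_eq_some_iff_getElem.mp hf
    have hsome : xs[k]? = some xs[k] := List.getElem?_eq_getElem hk
    have hsplit : xs = xs.take k ++ xs[k] :: xs.drop (k + 1) := by
      conv_lhs => rw [← List.take_append_drop k xs]
      rw [List.getElem_cons_drop]
    by_cases hxl : xs[k] = "l"
    · -- first marker is "l": index? "l" = some k и any "r" comes later
      have hil : PySem.List.index? xs "l" = some k := by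
        rw [PySem.List.index?_eq_some_iff]
        refine ⟨xs.take k, xs.drop (k + 1), ?_, by simp [hk.le], ?_⟩
        · rw [← hxl]; exact hsplit
        · intro hmem
          obtain ⟨j, hj, hje⟩ := List.mem_iff_getElem.mp hmem
          have hjk : j < k := by simpa [List.length_take, hk.le] using hj
          have : xs[j] = "l" := by
            rw [← hje]; exact (List.getElem_take).symm
          exact hmin j hjk (by simp [this])
      have hgt : ∀ m, PySem.List.index? xs "r" = some m → k < m := by
        intro m hm
        obtain ⟨hmlen, hme, _⟩ := PySem.List.getElem_of_index?_eq_some hm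
        rcases Nat.lt_trichotomy m k with h | h | h
        · exact absurd (by simp [hme]) (hmin m h)
        · subst h; rw [hme] at hxl; exact absurd hxl (by decide)
        · exact h
      rw [PySem.List.index?_eq_idxOf?] at hil
      cases hir : List.idxOf? "r" xs with
      | none =>
        have hne : ((k : Int)) ≠ ((xs.length : Int)) := by
          have := hk; omega
        simp [hil, hsome, hxl, hne, PySem.List.slice_to_natCast,
          show ((k : Int)) < ((xs.length : Int)) by exact_mod_cast hk]
      | some m =>
        have hkm := hgt m (by rw [PySem.List.index?_eq_idxOf?]; exact hir)
        have hne : ((k : Int)) ≠ ((m : Int)) := by omega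
        simp [hil, hsome, hxl, hne, PySem.List.slice_to_natCast,
          show ((k : Int)) < ((m : Int)) by exact_mod_cast hkm]
    · -- first marker is "r"
      have hxr : xs[k] = "r" := by
        rcases (by simpa using hpk : xs[k] = "l" ∨ xs[k] = "r") with h | h
        · exact absurd h hxl
        · exact h
      have hir : PySem.List.index? xs "r" = some k := by
        rw [PySem.List.index?_eq_some_iff]
        refine ⟨xs.take k, xs.drop (k + 1), ?_, by simp [hk.le], ?_⟩
        · rw [← hxr]; exact hsplit
        · intro hmem
          obtain ⟨j, hj, hje⟩ := List.mem_iff_getElem.mp hmem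
          have hjk : j < k := by simpa [List.length_take, hk.le] using hj
          have : xs[j] = "r" := by
            rw [← hje]; exact (List.getElem_take).symm
          exact hmin j hjk (by simp [this])
      have hgt : ∀ m, PySem.List.index? xs "l" = some m → k < m := by
        intro m hm
        obtain ⟨hmlen, hme, _⟩ := PySem.List.getElem_of_index?_eq_some hm
        rcases Nat.lt_trichotomy m k with h | h | h
        · exact absurd (by simp [hme]) (hmin m h)
        · subst h; exact absurd hme hxl
        · exact h
      have hcast : ((k : Int) + 1) = ((k + 1 : Nat) : Int) := by push_cast; ring
      rw [PySem.List.index?_eq_idxOf?] at hir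
      cases hil : List.idxOf? "l" xs with
      | none =>
        have hne : ((xs.length : Int)) ≠ ((k : Int)) := by
          have := hk; omega
        have hnlt : ¬ ((xs.length : Int)) < ((k : Int)) := by
          have := hk; omega
        simp only [hir, if_neg hne, if_neg hnlt]
        rw [hcast, PySem.List.slice_from_natCast]
        simp [hsome, hxl]
      | some m =>
        have hkm := hgt m (by rw [PySem.List.index?_eq_idxOf?]; exact hil)
        have hne : ((m : Int)) ≠ ((k : Int)) := by omega
        have hnlt : ¬ ((m : Int)) < ((k : Int)) := by omega
        simp only [hir, if_neg hne, if_neg hnlt]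
        rw [hcast, PySem.List.slice_from_natCast]
        simp [hsome, hxl]

-- ===== VERDICT (by name: the statement is the Claim_ definition above) =====
theorem solution_spec : Claim_equal_solution := by
  intro xs _
  unfold Spec_solution
  rw [A_eq_pvSpec, B_eq_pvSpec]
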